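-- pv_equiv track=rewrite | github.com/ShannonAI/fast-knn-nmt | fast_knn_nmt/custom_fairseq/data/knn_nmt_dataset.py | build_intra_reference_links
-- ===== SOURCE A (Python) =====
-- from typing import List, Tuple, Dict, Optional, Set, Union
--
-- def build_intra_reference_links(offsets2nid: Dict[Tuple[int, int], int]) -> Tuple[List[int], List[int]]:
--     us = []
--     vs = []
--     offsets = list(offsets2nid.keys())
--     offsets = sorted(offsets)
--     grouped_offsets = []  # group by sent_ids
--     group = []
--     for offset in offsets:
--         if group and group[-1][0] != offset[0]:
--             grouped_offsets.append(group)
--             group = [offset]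
--         else:
--             group.append(offset)
--     if group:
--         grouped_offsets.append(group)
--     for group in grouped_offsets:
--         group_ids = [offsets2nid[o] for o in group]
--         for u in group_ids:
--             for v in group_ids:
--                 us.append(u)
--                 vs.append(v)
--     return us, vs
-- ===== SOURCE B (Python) =====
-- def build_intra_reference_links(offsets2nid):
--     # hash-bucket offsets by sent_id in one pass, then sort each bucket,
--     # instead of globally sorting and segmenting contiguous runs
--     buckets = {}
--     for off in offsets2nid.keys():
--         buckets.setdefault(off[0], []).append(off)
--     us = []
--     vs = []
--     for sid in sorted(buckets.keys()):
--         ids = [offsets2nid[o] for o in sorted(buckets[sid])]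
--         us += [u for u in ids for _v in ids]
--         vs += [v for _u in ids for v in ids]
--     return us, vs
-- ===== Notes on version B (the rewrite author's own statement) =====
-- stated objective: alternative
-- what changed: Replaces the global sort of all offsets followed by contiguous-run segmentation with hash-bucketing by sent_id in one pass plus a per-bucket sort, and emits each group's Cartesian product with comprehensions instead of a four-deep append loop.
import Mathlib
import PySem

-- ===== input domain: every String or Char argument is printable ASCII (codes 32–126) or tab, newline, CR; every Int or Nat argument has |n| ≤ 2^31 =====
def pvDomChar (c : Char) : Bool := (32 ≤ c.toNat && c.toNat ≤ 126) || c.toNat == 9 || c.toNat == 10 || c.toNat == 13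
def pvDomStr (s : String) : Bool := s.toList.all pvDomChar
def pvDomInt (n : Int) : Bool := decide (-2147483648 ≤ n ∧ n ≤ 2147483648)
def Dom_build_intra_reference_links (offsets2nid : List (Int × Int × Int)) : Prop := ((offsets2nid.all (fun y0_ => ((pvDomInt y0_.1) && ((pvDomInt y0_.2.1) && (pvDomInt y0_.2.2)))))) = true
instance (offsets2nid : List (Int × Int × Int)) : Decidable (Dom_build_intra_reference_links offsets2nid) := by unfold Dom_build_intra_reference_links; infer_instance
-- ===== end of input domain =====

-- B replaces A's global sort + contiguous-run segmentation by hash-bucketing per sent_id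
-- plus a per-bucket sort (objective: alternative decomposition, same asymptotic cost).

-- ===== PORT A =====
-- one step of A's grouping loop ('if group and group[-1][0] != offset[0]: …')
def pvGStep (st : List (List (Int × Int)) × List (Int × Int)) (offset : Int × Int) :
    List (List (Int × Int)) × List (Int × Int) :=
  match st.2.getLast? with
  | some last => if last.1 ≠ offset.1 then (st.1 ++ [st.2], [offset]) else (st.1, st.2 ++ [offset])
  | none => (st.1, st.2 ++ [offset])

def build_intra_reference_links (offsets2nid : List (Int × Int × Int)) : List Int × List Int :=
  let d : PySem.Dict (Int × Int) Int :=
    PySem.Dict.ofList (offsets2nid.map (fun t => ((t.1, t.2.1), t.2.2)))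
  let offsets := d.keys
  let offsets := PySem.List.sorted2 offsets Prod.fst Prod.snd false
  let st := offsets.foldl pvGStep ([], [])
  let grouped_offsets := if st.2 ≠ [] then st.1 ++ [st.2] else st.1
  -- 'offsets2nid[o]': o is always a key of d, so getD never falls back to the default
  grouped_offsets.foldl (fun st group =>
    let group_ids := group.map (fun o => d.getD o 0)
    group_ids.foldl (fun st u => group_ids.foldl (fun st v => (st.1 ++ [u], st.2 ++ [v])) st) st)
    ([], [])

-- ===== PORT B =====
def build_intra_reference_links_alt (offsets2nid : List (Int × Int × Int)) : List Int × List Int :=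
  let d : PySem.Dict (Int × Int) Int :=
    PySem.Dict.ofList (offsets2nid.map (fun t => ((t.1, t.2.1), t.2.2)))
  -- 'buckets.setdefault(off[0], []).append(off)'
  let buckets : PySem.Dict Int (List (Int × Int)) :=
    d.keys.foldl (fun b off => b.modify off.1 [] (fun l => l ++ [off])) PySem.Dict.empty
  (PySem.List.sorted buckets.keys (fun x => x) false).foldl
    (fun st sid =>
      let ids := (PySem.List.sorted2 (buckets.getD sid []) Prod.fst Prod.snd false).map
        (fun o => d.getD o 0)
      (st.1 ++ ids.flatMap (fun u => ids.map (fun _ => u)), st.2 ++ ids.flatMap (fun _ => ids)))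
    ([], [])

-- ===== PRECONDITION & SPEC =====
def Spec_build_intra_reference_links (offsets2nid : List (Int × Int × Int)) (out : List Int × List Int) : Prop := out = build_intra_reference_links_alt offsets2nid
instance (offsets2nid : List (Int × Int × Int)) (out : List Int × List Int) : Decidable (Spec_build_intra_reference_links offsets2nid out) := by unfold Spec_build_intra_reference_links; infer_instance

-- ===== CLAIM (what is proved, stated in full; the proofs are below) =====
def Claim_equal_build_intra_reference_links : Prop := ∀ (offsets2nid : List (Int × Int × Int)), Dom_build_intra_reference_links offsets2nid → Spec_build_intra_reference_links offsets2nid (build_intra_reference_links offsets2nid)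

-- ===== LEMMAS AND PROOFS =====

-- Python's lexicographic ≤ on int pairs
def pvLexLE (a b : Int × Int) : Prop := a.1 < b.1 ∨ (a.1 = b.1 ∧ a.2 ≤ b.2)

theorem pvLexLE_trans : ∀ {a b c : Int × Int}, pvLexLE a b → pvLexLE b c → pvLexLE a c := by
  intro a b c hab hbc
  unfold pvLexLE at *
  omega

theorem insertBy_pairwise {α : Type} (r : α → α → Prop) (htr : ∀ {a b c}, r a b → r b c → r a c)
    (before : α → α → Bool)
    (hT : ∀ a b, before a b = true → r a b) (hF : ∀ a b, before a b = false → r b a)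
    (x : α) (ys : List α) (h : ys.Pairwise r) :
    (PySem.List.insertBy before x ys).Pairwise r := by
  induction ys with
  | nil => simp [PySem.List.insertBy]
  | cons y ys ih =>
    rcases List.pairwise_cons.mp h with ⟨hy, hys⟩
    by_cases hb : before x y = true
    · simp only [PySem.List.insertBy, hb, if_pos]
      refine List.pairwise_cons.mpr ⟨?_, h⟩
      intro z hz
      rcases List.mem_cons.mp hz with rfl | hz
      · exact hT _ _ hb
      · exact htr (hT _ _ hb) (hy _ hz)
    · rw [show PySem.List.insertBy before x (y :: ys) = y :: PySem.List.insertBy before x ys by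
        simp [PySem.List.insertBy, hb]]
      refine List.pairwise_cons.mpr ⟨?_, ih hys⟩
      intro z hz
      rcases (PySem.List.mem_insertBy _ _ _ _).mp hz with rfl | hz
      · exact hF _ _ (by simpa using hb)
      · exact hy _ hz

theorem foldl_insertBy_pairwise {α : Type} (r : α → α → Prop) (htr : ∀ {a b c}, r a b → r b c → r a c)
    (before : α → α → Bool)
    (hT : ∀ a b, before a b = true → r a b) (hF : ∀ a b, before a b = false → r b a)
    (xs acc : List α) (hacc : acc.Pairwise r) :
    (xs.foldl (fun acc x => PySem.List.insertBy before x acc) acc).Pairwise r := by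
  induction xs generalizing acc with
  | nil => simpa using hacc
  | cons x xs ih => exact ih _ (insertBy_pairwise r htr before hT hF x acc hacc)

theorem sorted2_pairwise_lex (xs : List (Int × Int)) :
    (PySem.List.sorted2 xs Prod.fst Prod.snd false).Pairwise pvLexLE := by
  refine foldl_insertBy_pairwise pvLexLE pvLexLE_trans
    (fun a b => decide (a.1 < b.1) || !decide (b.1 < a.1) && decide (a.2 < b.2)) ?_ ?_ xs []
    List.Pairwise.nil
  · intro a b hb
    simp at hb
    unfold pvLexLE
    omega
  · intro a b hb
    simp at hb
    unfold pvLexLE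
    omega

theorem sorted2_eq_of_perm_of_pairwise_lex (xs ys : List (Int × Int))
    (hp : ys.Perm xs) (hs : ys.Pairwise pvLexLE) :
    PySem.List.sorted2 xs Prod.fst Prod.snd false = ys := by
  refine List.eq_of_perm_of_sorted ?_ (sorted2_pairwise_lex xs) hs
    ((PySem.List.sorted2_perm xs Prod.fst Prod.snd false).trans hp.symm)
  intro a b _ _ hab hba
  unfold pvLexLE at hab hba
  ext <;> omega

-- dedup is a sublist of its argument
theorem foldl_add_sublist {α : Type} [BEq α] (l s : List α) :
    ∃ t, l.foldl PySem.Set.add s = s ++ t ∧ t.Sublist l := by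
  induction l generalizing s with
  | nil => exact ⟨[], by simp, List.Sublist.refl _⟩
  | cons x l ih =>
    by_cases hc : PySem.Set.contains s x = true
    · obtain ⟨t, ht, hsub⟩ := ih s
      refine ⟨t, ?_, hsub.cons x⟩
      rw [List.foldl_cons, show PySem.Set.add s x = s from by unfold PySem.Set.add; rw [if_pos hc]]
      exact ht
    · obtain ⟨t, ht, hsub⟩ := ih (s ++ [x])
      refine ⟨x :: t, ?_, hsub.cons₂ x⟩
      rw [List.foldl_cons, show PySem.Set.add s x = s ++ [x] from by unfold PySem.Set.add; rw [if_neg hc]]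
      simpa [List.append_assoc] using ht

theorem dedup_sublist {α : Type} [BEq α] (l : List α) :
    (PySem.List.dedup l).Sublist l := by
  obtain ⟨t, ht, hsub⟩ := foldl_add_sublist l ([] : List α)
  unfold PySem.List.dedup PySem.Set.ofList
  show l.foldl PySem.Set.add ([] : List α) |>.Sublist l
  rw [show (([] : List α) : PySem.Set α) = ([] : List α) from rfl] at ht
  rw [ht]
  simpa using hsub

theorem foldl_add_cons_notmem {α : Type} [BEq α] [LawfulBEq α] (r : List α) (s : α) :
    ∀ (acc : List α), s ∉ r → r.foldl PySem.Set.add (s :: acc) = s :: r.foldl PySem.Set.add acc := by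
  induction r with
  | nil => intro acc _; rfl
  | cons x r ih =>
    intro acc h
    have hxs : (x == s) = false := by
      have hne : x ≠ s := by rintro rfl; exact h List.mem_cons_self
      exact beq_eq_false_iff_ne.mpr hne
    have hstep : PySem.Set.add (s :: acc) x = s :: PySem.Set.add acc x := by
      unfold PySem.Set.add PySem.Set.contains
      rw [List.contains_cons, hxs, Bool.false_or]
      by_cases hm : List.contains acc x = true
      · rw [if_pos hm, if_pos hm]
      · rw [if_neg hm, if_neg hm]
        rfl
    rw [List.foldl_cons, hstep, List.foldl_cons]
    exact ih _ (fun hm => h (List.mem_cons_of_mem _ hm))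

theorem foldl_add_all_eq (m : List Int) (s : Int) (hm : ∀ y ∈ m, y = s) :
    m.foldl PySem.Set.add [s] = [s] := by
  induction m with
  | nil => rfl
  | cons y m ih =>
    have hy : y = s := hm y List.mem_cons_self
    subst hy
    rw [List.foldl_cons, show PySem.Set.add [y] y = [y] from by simp [PySem.Set.add, PySem.Set.contains]]
    exact ih (fun z hz => hm z (List.mem_cons_of_mem _ hz))

-- dedup of a constant nonempty block followed by a tail avoiding the constant
theorem dedup_block (s : Int) (m r : List Int) (hm : ∀ y ∈ m, y = s) (hne : m ≠ [])
    (hr : s ∉ r) : PySem.List.dedup (m ++ r) = s :: PySem.List.dedup r := by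
  unfold PySem.List.dedup PySem.Set.ofList PySem.Set.empty
  rw [List.foldl_append]
  have hm1 : m.foldl PySem.Set.add [] = [s] := by
    cases m with
    | nil => exact absurd rfl hne
    | cons y m =>
      have hy : y = s := hm y List.mem_cons_self
      subst hy
      rw [List.foldl_cons, show PySem.Set.add [] y = [y] from by simp [PySem.Set.add, PySem.Set.contains]]
      exact foldl_add_all_eq m y (fun z hz => hm z (List.mem_cons_of_mem _ hz))
  rw [hm1, show ([s] : List Int) = s :: [] from rfl, foldl_add_cons_notmem r s [] hr]

theorem pvGStep_none (gs : List (List (Int × Int))) (g : List (Int × Int)) (x : Int × Int)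
    (h : g.getLast? = none) : pvGStep (gs, g) x = (gs, g ++ [x]) := by
  unfold pvGStep
  rw [h]

theorem pvGStep_new (gs : List (List (Int × Int))) (g : List (Int × Int)) (x last : Int × Int)
    (h : g.getLast? = some last) (hne : last.1 ≠ x.1) : pvGStep (gs, g) x = (gs ++ [g], [x]) := by
  unfold pvGStep
  rw [h]
  exact if_pos hne

theorem pvGStep_same (gs : List (List (Int × Int))) (g : List (Int × Int)) (x last : Int × Int)
    (h : g.getLast? = some last) (hne : ¬ last.1 ≠ x.1) : pvGStep (gs, g) x = (gs, g ++ [x]) := by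
  unfold pvGStep
  rw [h]
  exact if_neg hne

-- A's grouping loop only ever appends to the grouped list
theorem gstep_prefix (S : List (Int × Int)) : ∀ (gs₁ gs₂ : List (List (Int × Int)))
    (g : List (Int × Int)),
    S.foldl pvGStep (gs₁ ++ gs₂, g) =
      (gs₁ ++ (S.foldl pvGStep (gs₂, g)).1, (S.foldl pvGStep (gs₂, g)).2) := by
  induction S with
  | nil => simp
  | cons x S ih =>
    intro gs₁ gs₂ g
    simp only [List.foldl_cons]
    cases hg : g.getLast? with
    | none =>
      rw [pvGStep_none _ _ _ hg, pvGStep_none _ _ _ hg]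
      exact ih gs₁ gs₂ (g ++ [x])
    | some last =>
      by_cases hne : last.1 ≠ x.1
      · rw [pvGStep_new _ _ _ _ hg hne, pvGStep_new _ _ _ _ hg hne]
        simpa [List.append_assoc] using ih gs₁ (gs₂ ++ [g]) [x]
      · rw [pvGStep_same _ _ _ _ hg hne, pvGStep_same _ _ _ _ hg hne]
        exact ih gs₁ gs₂ (g ++ [x])

-- a run of offsets with one sent_id only extends the current group
theorem gstep_block (B : List (Int × Int)) (s : Int) (gs : List (List (Int × Int))) :
    ∀ (g : List (Int × Int)), (∀ y ∈ g, y.1 = s) → (∀ y ∈ B, y.1 = s) →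
    B.foldl pvGStep (gs, g) = (gs, g ++ B) := by
  induction B with
  | nil => intro g _ _; simp
  | cons x B ih =>
    intro g hg hB
    simp only [List.foldl_cons]
    have hgB : ∀ y ∈ g ++ [x], y.1 = s := by
      intro y hy
      rcases List.mem_append.mp hy with h | h
      · exact hg y h
      · have : y = x := by simpa using h
        subst this; exact hB y List.mem_cons_self
    have hB' : ∀ y ∈ B, y.1 = s := fun y hy => hB y (List.mem_cons_of_mem _ hy)
    cases hgl : g.getLast? with
    | none =>
      have hgnil : g = [] := List.getLast?_eq_none_iff.mp hgl
      subst hgnil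
      rw [pvGStep_none _ _ _ hgl]
      simpa using ih ([] ++ [x]) hgB hB'
    | some last =>
      have hlast : last.1 = s := hg last (List.mem_of_getLast? hgl)
      have hx : x.1 = s := hB x List.mem_cons_self
      rw [pvGStep_same _ _ _ _ hgl (by omega)]
      simpa [List.append_assoc] using ih (g ++ [x]) hgB hB'

-- characterisation of A's grouping loop on a list with non-decreasing sent_ids
theorem groups_char : ∀ (n : Nat) (S : List (Int × Int)), S.length ≤ n →
    S.Pairwise (fun a b => a.1 ≤ b.1) →
    (if (S.foldl pvGStep ([], [])).2 ≠ [] then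
        (S.foldl pvGStep ([], [])).1 ++ [(S.foldl pvGStep ([], [])).2]
      else (S.foldl pvGStep ([], [])).1) =
      (PySem.List.dedup (S.map Prod.fst)).map (fun s => S.filter (fun o => o.1 == s)) := by
  intro n
  induction n with
  | zero =>
    intro S hlen _
    have : S = [] := List.eq_nil_of_length_eq_zero (Nat.le_zero.mp hlen)
    subst this
    simp [PySem.List.dedup, PySem.Set.ofList]
  | succ n ih =>
    intro S hlen hsort
    cases hS : S with
    | nil => simp [PySem.List.dedup, PySem.Set.ofList]
    | cons x S' =>
    subst hS
    set s := x.1 with hs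
    set p : (Int × Int) → Bool := fun o => o.1 == s with hp
    have hxp : p x = true := by rw [hp]; simp [hs]
    set T := (x :: S').takeWhile p with hTdef
    set R := (x :: S').dropWhile p with hRdef
    have hTR : T ++ R = x :: S' := List.takeWhile_append_dropWhile
    have hTcons : T = x :: S'.takeWhile p := by rw [hTdef, List.takeWhile_cons_of_pos hxp]
    have hTne : T ≠ [] := by rw [hTcons]; simp
    have hTs : ∀ y ∈ T, y.1 = s := by
      intro y hy
      have := List.mem_takeWhile_imp (hTdef ▸ hy)
      simpa [hp] using this
    have hsortR : R.Pairwise (fun a b => a.1 ≤ b.1) := hsort.sublist (hRdef ▸ List.dropWhile_sublist p)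
    have hRs : ∀ y ∈ R, y.1 ≠ s := by
      cases hR : R with
      | nil => simp
      | cons r R' =>
        have hRne : (x :: S').dropWhile p ≠ [] := by rw [← hRdef, hR]; simp
        have hrp : p (((x :: S').dropWhile p).head hRne) = false := List.head_dropWhile_not p hRne
        have hhead : ((x :: S').dropWhile p).head hRne = r := by
          have h1 : (x :: S').dropWhile p = r :: R' := by rw [← hRdef, hR]
          simp [h1]
        rw [hhead] at hrp
        have hr1 : r.1 ≠ s := by simpa [hp] using hrp
        have hrmem : r ∈ x :: S' := (hTR ▸ List.mem_append_right T (hR ▸ List.mem_cons_self))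
        have hrS' : r ∈ S' := by
          rcases List.mem_cons.mp hrmem with h | h
          · exact absurd (h ▸ rfl) hr1
          · exact h
        have hxr : s ≤ r.1 := by
          rcases List.pairwise_cons.mp hsort with ⟨hx, _⟩
          exact hx r hrS'
        intro y hy
        have hsR : (r :: R').Pairwise (fun a b => a.1 ≤ b.1) := by rw [← hR]; exact hsortR
        rcases List.mem_cons.mp (show y ∈ r :: R' from hR ▸ hy) with rfl | hy'
        · exact hr1
        · have : r.1 ≤ y.1 := by
            rcases List.pairwise_cons.mp hsR with ⟨hrle, _⟩
            exact hrle y hy'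
          omega
    have hT1 : 1 ≤ T.length := by
      cases hTnil : T with
      | nil => exact absurd hTnil hTne
      | cons a b => simp
    have hlen2 : T.length + R.length = S'.length + 1 := by
      have h := congrArg List.length hTR
      simpa using h
    have hlenR : R.length < (x :: S').length := by
      simp only [List.length_cons]
      omega
    have hfold : (x :: S').foldl pvGStep ([], []) = R.foldl pvGStep ([], T) := by
      conv_lhs => rw [← hTR]
      rw [List.foldl_append, gstep_block T s [] [] (by simp) hTs]
      simp
    -- RHS decomposition
    have hmapfst : (x :: S').map Prod.fst = T.map Prod.fst ++ R.map Prod.fst := by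
      rw [← hTR, List.map_append]
    have hTfst : ∀ y ∈ T.map Prod.fst, y = s := by
      intro y hy
      obtain ⟨o, ho, rfl⟩ := List.mem_map.mp hy
      exact hTs o ho
    have hTfstne : T.map Prod.fst ≠ [] := by
      cases hTnil : T with
      | nil => exact absurd hTnil hTne
      | cons a b => simp
    have hsnotR : s ∉ R.map Prod.fst := by
      intro hmem
      obtain ⟨o, ho, hfst⟩ := List.mem_map.mp hmem
      exact hRs o ho hfst
    have hded : PySem.List.dedup ((x :: S').map Prod.fst) = s :: PySem.List.dedup (R.map Prod.fst) := by
      rw [hmapfst]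
      exact dedup_block s _ _ hTfst hTfstne hsnotR
    have hfilters : (x :: S').filter (fun o => o.1 == s) = T := by
      rw [← hTR, List.filter_append]
      rw [List.filter_eq_self.mpr (by intro a ha; simpa [hp] using hTs a ha)]
      rw [List.filter_eq_nil_iff.mpr (by intro a ha; simpa [hp] using hRs a ha)]
      simp
    have hfilters' : ∀ s' ∈ PySem.List.dedup (R.map Prod.fst),
        (x :: S').filter (fun o => o.1 == s') = R.filter (fun o => o.1 == s') := by
      intro s' hs'
      have hs'R : s' ∈ R.map Prod.fst := (PySem.List.mem_dedup _ _).mp hs'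
      have hs'ne : s' ≠ s := fun h => hsnotR (h ▸ hs'R)
      rw [← hTR, List.filter_append]
      rw [List.filter_eq_nil_iff.mpr (by
        intro a ha
        have := hTs a ha
        simp only [beq_iff_eq]
        intro hcontra
        exact hs'ne (by rw [← hcontra, this]))]
      simp
    cases hR : R with
    | nil =>
      rw [hfold, hR]
      simp only [List.foldl_nil]
      rw [if_pos hTne]
      rw [hded, hR]
      simp only [List.map_nil, PySem.List.dedup, PySem.Set.ofList, List.foldl_nil, List.map_cons]
      rw [hfilters]
      rfl
    | cons r R' =>
      have hstep : pvGStep ([], T) r = ([T], [r]) := by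
        obtain ⟨last, hlast⟩ : ∃ last, T.getLast? = some last := by
          cases hTnil : T with
          | nil => exact absurd hTnil hTne
          | cons a b => exact ⟨(a :: b).getLast (by simp), by rw [List.getLast?_eq_getLast]⟩
        have hlasts : last.1 = s := hTs last (List.mem_of_getLast? hlast)
        have hrne : r.1 ≠ s := hRs r (hR ▸ List.mem_cons_self)
        unfold pvGStep
        rw [hlast]
        simp only
        rw [if_pos (by omega)]
        rfl
      have hfirst : pvGStep ([], []) r = ([], [r]) := by unfold pvGStep; simp
      have hRfold : R.foldl pvGStep ([], T) =
          ([T] ++ (R.foldl pvGStep ([], [])).1, (R.foldl pvGStep ([], [])).2) := by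
        rw [hR, List.foldl_cons, hstep, List.foldl_cons, hfirst]
        have := gstep_prefix R' [T] [] [r]
        simpa using this
      have hIH := ih R (by omega) hsortR
      rw [hfold, hRfold]
      rw [hded]
      simp only [List.map_cons]
      rw [hfilters]
      by_cases hg2 : (R.foldl pvGStep ([], [])).2 ≠ []
      · rw [if_pos (by simp [hg2])]
        rw [if_pos hg2] at hIH
        rw [List.map_congr_left hfilters']
        rw [← hIH]
        simp [List.append_assoc]
      · rw [if_neg (by simpa using hg2)]
        rw [if_neg hg2] at hIH
        rw [List.map_congr_left hfilters']
        rw [← hIH]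
        simp

-- the two per-group emit loops of A
theorem emit_inner (ids : List Int) (u : Int) : ∀ (a b : List Int),
    ids.foldl (fun st v => (st.1 ++ [u], st.2 ++ [v])) (a, b) =
      (a ++ ids.map (fun _ => u), b ++ ids) := by
  induction ids with
  | nil => intro a b; simp
  | cons v ids ih =>
    intro a b
    simpa [List.append_assoc] using ih (a ++ [u]) (b ++ [v])

theorem emit_mid (l ids : List Int) : ∀ (a b : List Int),
    l.foldl (fun st u => ids.foldl (fun st v => (st.1 ++ [u], st.2 ++ [v])) st) (a, b) =
      (a ++ l.flatMap (fun u => ids.map (fun _ => u)), b ++ l.flatMap (fun _ => ids)) := by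
  induction l with
  | nil => intro a b; simp
  | cons u l ih =>
    intro a b
    simp only [List.foldl_cons, emit_inner, List.flatMap_cons]
    rw [ih]
    simp [List.append_assoc]

theorem emit_outer (gs : List (List (Int × Int))) (f : Int × Int → Int) : ∀ (a b : List Int),
    gs.foldl (fun st group =>
      (group.map f).foldl (fun st u =>
        (group.map f).foldl (fun st v => (st.1 ++ [u], st.2 ++ [v])) st) st) (a, b) =
      (a ++ gs.flatMap (fun g => (g.map f).flatMap (fun u => (g.map f).map (fun _ => u))),
       b ++ gs.flatMap (fun g => (g.map f).flatMap (fun _ => g.map f))) := by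
  induction gs with
  | nil => intro a b; simp
  | cons g gs ih =>
    intro a b
    simp only [List.foldl_cons, List.flatMap_cons]
    rw [emit_mid, ih]
    simp [List.append_assoc]

-- B's output loop
theorem bfold (l : List Int) (F G : Int → List Int) : ∀ (a b : List Int),
    l.foldl (fun st s => (st.1 ++ F s, st.2 ++ G s)) (a, b) = (a ++ l.flatMap F, b ++ l.flatMap G) := by
  induction l with
  | nil => intro a b; simp
  | cons s l ih =>
    intro a b
    simp only [List.foldl_cons, List.flatMap_cons]
    rw [ih]
    simp [List.append_assoc]

-- B's bucket-building loop, characterised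
theorem buckets_getD (K : List (Int × Int)) (s : Int) :
    (K.foldl (fun b off => b.modify off.1 [] (fun l => l ++ [off]))
      (PySem.Dict.empty : PySem.Dict Int (List (Int × Int)))).getD s [] =
      K.filter (fun o => o.1 == s) := by
  have h : K.foldl (fun b off => b.modify off.1 [] (fun l => l ++ [off]))
      (PySem.Dict.empty : PySem.Dict Int (List (Int × Int)))
      = (K.map (fun o => (o.1, o))).foldl
          (fun d p => d.modify p.1 [] (fun l => l ++ [p.2])) PySem.Dict.empty := by
    rw [List.foldl_map]
  rw [h, PySem.Dict.getD_foldl_modify_append, PySem.Dict.getD_empty, List.nil_append,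
    List.filter_map]
  simp [Function.comp_def]

theorem buckets_keys (K : List (Int × Int)) :
    (K.foldl (fun b off => b.modify off.1 [] (fun l => l ++ [off]))
      (PySem.Dict.empty : PySem.Dict Int (List (Int × Int)))).keys =
      PySem.List.dedup (K.map Prod.fst) := by
  have h := PySem.Dict.keys_foldl_modify_key K Prod.fst ([] : List (Int × Int))
    (fun _ off => (fun l => l ++ [off])) PySem.Dict.empty
  exact h

-- A's group heads, in order, are B's sorted distinct sent_ids
theorem sids_eq (K : List (Int × Int)) :
    PySem.List.sorted (PySem.List.dedup (K.map Prod.fst)) (fun x => x) false =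
      PySem.List.dedup ((PySem.List.sorted2 K Prod.fst Prod.snd false).map Prod.fst) := by
  apply PySem.List.sorted_id_eq_of_perm_of_pairwise
  · refine (List.perm_ext_iff_of_nodup (PySem.List.nodup_dedup _) (PySem.List.nodup_dedup _)).mpr ?_
    intro a
    rw [PySem.List.mem_dedup, PySem.List.mem_dedup]
    exact ((PySem.List.sorted2_perm K Prod.fst Prod.snd false).map Prod.fst).mem_iff
  · refine List.Pairwise.sublist (dedup_sublist _) ?_
    rw [List.pairwise_map]
    exact (sorted2_pairwise_lex K).imp (by intro a b h; unfold pvLexLE at h; omega)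

-- sorting a bucket equals filtering the globally sorted list
theorem filter_sorted2 (K : List (Int × Int)) (s : Int) :
    PySem.List.sorted2 (K.filter (fun o => o.1 == s)) Prod.fst Prod.snd false =
      (PySem.List.sorted2 K Prod.fst Prod.snd false).filter (fun o => o.1 == s) := by
  apply sorted2_eq_of_perm_of_pairwise_lex
  · exact List.Perm.filter _ (PySem.List.sorted2_perm K Prod.fst Prod.snd false)
  · exact List.Pairwise.sublist List.filter_sublist (sorted2_pairwise_lex K)

-- ===== VERDICT (by name: the statement is the Claim_ definition above) =====
theorem build_intra_reference_links_spec : Claim_equal_build_intra_reference_links := by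
  intro xs _
  unfold Spec_build_intra_reference_links build_intra_reference_links build_intra_reference_links_alt
  dsimp only
  generalize PySem.Dict.ofList (xs.map (fun t => ((t.1, t.2.1), t.2.2))) = d
  have hfst : (PySem.List.sorted2 d.keys Prod.fst Prod.snd false).Pairwise
      (fun a b => a.1 ≤ b.1) :=
    (sorted2_pairwise_lex d.keys).imp (by intro a b h; unfold pvLexLE at h; omega)
  rw [groups_char (PySem.List.sorted2 d.keys Prod.fst Prod.snd false).length _ le_rfl hfst]
  rw [emit_outer]
  rw [buckets_keys]
  simp only [buckets_getD, filter_sorted2]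
  rw [sids_eq]
  rw [bfold]
  simp [List.flatMap_map]
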